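-- pv_equiv track=rewrite | github.com/EricWebsmith/leetcode_py | archive/lc_1862_sum_of_floored_pairs.py | sumOfFlooredPairs
-- ===== SOURCE A (Python) =====
-- from typing import Counter, List
--
-- def sumOfFlooredPairs(nums: List[int]) -> int:
--     MOD = 1_000_000_007
--     counts = Counter(nums)
--     keys = list(counts.keys())
--     keys.sort()
--     n = len(keys)
--
--     ans = 0
--     for i in range(n):
--         ci = counts[keys[i]]
--         ans += ci * ci
--         ans = ans % MOD
--         for j in range(i+1, n):
--             cj = counts[keys[j]]
--             floor = keys[j] // keys[i]
--
--             ans += floor * ci * cj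
--             ans = ans % MOD
--
--     return ans
-- ===== SOURCE B (Python) =====
-- from typing import List
--
-- def sumOfFlooredPairs(nums: List[int]) -> int:
--     MOD = 1_000_000_007
--     ans = 0
--     for a in nums:
--         for b in nums:
--             if a == b:
--                 ans += 1
--             elif a < b:
--                 ans += b // a
--     return ans % MOD
-- ===== Notes on version B (the rewrite author's own statement) =====
-- stated objective: simpler
-- what changed: B drops A's Counter, key sort and triangular iteration over distinct sorted values and instead folds the per-pair contribution (1 on equal elements, floor(b/a) when a < b) directly over all ordered element pairs in one plain double loop.
import Mathlib
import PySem

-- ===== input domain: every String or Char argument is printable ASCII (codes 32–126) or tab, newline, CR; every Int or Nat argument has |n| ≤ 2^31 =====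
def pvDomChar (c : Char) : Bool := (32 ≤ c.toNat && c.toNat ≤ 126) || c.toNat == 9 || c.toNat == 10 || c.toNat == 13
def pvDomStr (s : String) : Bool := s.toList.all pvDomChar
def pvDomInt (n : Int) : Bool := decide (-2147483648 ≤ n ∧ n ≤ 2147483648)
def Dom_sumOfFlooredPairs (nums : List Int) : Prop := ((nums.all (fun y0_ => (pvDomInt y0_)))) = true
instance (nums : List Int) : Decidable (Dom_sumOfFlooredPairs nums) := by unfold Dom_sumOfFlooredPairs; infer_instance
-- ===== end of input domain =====

-- B replaces A's Counter + sort + triangular distinct-key iteration by one direct double loop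
-- over the elements themselves (objective: simpler; not faster).

-- ===== PORT A =====
def sumOfFlooredPairs (nums : List Int) : Int :=
  let M : Int := 1000000007
  let counts := PySem.Dict.counter nums
  let keys : List Int := PySem.List.sorted (PySem.Dict.keys counts) (fun k => k) false
  let n : Int := PySem.List.len keys
  (PySem.List.pyRange 0 n 1).foldl (fun ans i =>
    let ci := counts.getD (PySem.List.pyGetD keys i 0) 0
    let ans := PySem.Int.mod (ans + ci * ci) M
    (PySem.List.pyRange (i + 1) n 1).foldl (fun ans j =>
      let cj := counts.getD (PySem.List.pyGetD keys j 0) 0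
      let floor := PySem.Int.floordiv (PySem.List.pyGetD keys j 0) (PySem.List.pyGetD keys i 0)
      PySem.Int.mod (ans + floor * ci * cj) M) ans) 0

-- ===== PORT B =====
def sumOfFlooredPairs_alt (nums : List Int) : Int :=
  let ans : Int := nums.foldl (fun ans a =>
    nums.foldl (fun ans b =>
      if a = b then ans + 1
      else if a < b then ans + PySem.Int.floordiv b a
      else ans) ans) 0
  PySem.Int.mod ans 1000000007

-- ===== PRECONDITION & SPEC =====
-- Pre_ excludes exactly the inputs on which both Pythons raise ZeroDivisionError:
-- 0 occurring in nums together with a strictly positive element.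
def Pre_sumOfFlooredPairs (nums : List Int) : Prop :=
  ¬((0 : Int) ∈ nums ∧ ∃ x ∈ nums, 0 < x)
instance (nums : List Int) : Decidable (Pre_sumOfFlooredPairs nums) := by
  unfold Pre_sumOfFlooredPairs; infer_instance

def pvWitness_sumOfFlooredPairs : List Int := [1, 2, 3]

def Spec_sumOfFlooredPairs (nums : List Int) (out : Int) : Prop := out = sumOfFlooredPairs_alt nums
instance (nums : List Int) (out : Int) : Decidable (Spec_sumOfFlooredPairs nums out) := by
  unfold Spec_sumOfFlooredPairs; infer_instance

-- ===== CLAIM (what is proved, stated in full; the proofs are below) =====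
def Claim_equal_sumOfFlooredPairs : Prop := ∀ (nums : List Int), Dom_sumOfFlooredPairs nums → Pre_sumOfFlooredPairs nums → Spec_sumOfFlooredPairs nums (sumOfFlooredPairs nums)

-- ===== LEMMAS AND PROOFS =====

-- the per-ordered-pair contribution both programs sum: 1 on the diagonal,
-- floor(b/a) when a < b, 0 when b < a
def pvF (a b : Int) : Int :=
  if a = b then 1 else if a < b then PySem.Int.floordiv b a else 0

-- the grand total over all ordered pairs of elements of nums
def pvTot (nums : List Int) : Int :=
  (nums.map (fun a => (nums.map (fun b => pvF a b)).sum)).sum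

-- A's triangular sum over a list of keys, with multiplicity function c
def pvPS (c : Int → Int) : List Int → Int
  | [] => 0
  | k :: r =>
      c k * c k + (r.map (fun k' => PySem.Int.floordiv k' k * c k * c k')).sum + pvPS c r

-- A's per-key row, in index form
def pvG (c : Int → Int) (keys : List Int) (i : Int) : Int :=
  c (PySem.List.pyGetD keys i 0) * c (PySem.List.pyGetD keys i 0) +
    ((PySem.List.pyRange (i + 1) (PySem.List.len keys) 1).map (fun j =>
      PySem.Int.floordiv (PySem.List.pyGetD keys j 0) (PySem.List.pyGetD keys i 0) *
        c (PySem.List.pyGetD keys i 0) * c (PySem.List.pyGetD keys j 0))).sum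

-- A's per-key row, in structural form
def pvW (c : Int → Int) (keys : List Int) (i : Nat) : Int :=
  c (keys.getD i 0) * c (keys.getD i 0) +
    ((keys.drop (i + 1)).map (fun k' =>
      PySem.Int.floordiv k' (keys.getD i 0) * c (keys.getD i 0) * c k')).sum

-- running `ans = (ans + g x) % MOD` over a list, starting from a reduced accumulator
lemma pv_modfold {α : Type} (l : List α) (g : α → Int) :
    ∀ t : Int, l.foldl (fun acc x => PySem.Int.mod (acc + g x) 1000000007)
        (PySem.Int.mod t 1000000007) =
      PySem.Int.mod (t + (l.map g).sum) 1000000007 := by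
  induction l with
  | nil => intro t; simp
  | cons x l ih =>
    intro t
    simp only [List.foldl_cons, List.map_cons, List.sum_cons]
    have h1 : PySem.Int.mod (PySem.Int.mod t 1000000007 + g x) 1000000007
        = PySem.Int.mod (t + g x) 1000000007 := by
      rw [PySem.Int.mod_eq_emod_of_pos (by norm_num), PySem.Int.mod_eq_emod_of_pos (by norm_num),
        PySem.Int.mod_eq_emod_of_pos (by norm_num)]
      omega
    rw [h1, ih (t + g x)]
    ring_nf

-- A's outer loop, with the inner loop summed per step
lemma pv_outer (c : Int → Int) (keys : List Int) (L : List Int) :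
    ∀ t : Int,
      L.foldl (fun ans i =>
        (PySem.List.pyRange (i + 1) (PySem.List.len keys) 1).foldl (fun ans j =>
          PySem.Int.mod (ans + PySem.Int.floordiv (PySem.List.pyGetD keys j 0) (PySem.List.pyGetD keys i 0) *
            c (PySem.List.pyGetD keys i 0) * c (PySem.List.pyGetD keys j 0)) 1000000007)
          (PySem.Int.mod (ans + c (PySem.List.pyGetD keys i 0) * c (PySem.List.pyGetD keys i 0)) 1000000007))
        (PySem.Int.mod t 1000000007) =
      PySem.Int.mod (t + (L.map (pvG c keys)).sum) 1000000007 := by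
  induction L with
  | nil => intro t; simp
  | cons i L ih =>
    intro t
    simp only [List.foldl_cons, List.map_cons, List.sum_cons]
    have h1 : PySem.Int.mod (PySem.Int.mod t 1000000007 + c (PySem.List.pyGetD keys i 0) * c (PySem.List.pyGetD keys i 0)) 1000000007
        = PySem.Int.mod (t + c (PySem.List.pyGetD keys i 0) * c (PySem.List.pyGetD keys i 0)) 1000000007 := by
      rw [PySem.Int.mod_eq_emod_of_pos (by norm_num), PySem.Int.mod_eq_emod_of_pos (by norm_num),
        PySem.Int.mod_eq_emod_of_pos (by norm_num)]
      omega
    rw [h1, pv_modfold, ih]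
    congr 1
    simp [pvG]
    ring

-- a range-with-indices sum over a suffix of keys is a structural sum
lemma pv_inner (keys : List Int) (u : Int → Int) (a : Nat) :
    ((PySem.List.pyRange (a : Int) (PySem.List.len keys) 1).map (fun j =>
        u (PySem.List.pyGetD keys j 0))).sum =
      ((keys.drop a).map u).sum := by
  have h := PySem.List.map_pyGetD_pyRange keys 0 (a := (a : Int)) (by positivity)
  calc ((PySem.List.pyRange (a : Int) (PySem.List.len keys) 1).map (fun j =>
        u (PySem.List.pyGetD keys j 0))).sum
      = (((PySem.List.pyRange (a : Int) (PySem.List.len keys) 1).map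
          (fun j => PySem.List.pyGetD keys j 0)).map u).sum := by rw [List.map_map]; rfl
    _ = ((keys.drop a).map u).sum := by rw [h]; simp

lemma pv_GW (c : Int → Int) (keys : List Int) (i : Nat) :
    pvG c keys (i : Int) = pvW c keys i := by
  unfold pvG pvW
  have hcast : ((i : Int) + 1) = ((i + 1 : Nat) : Int) := by push_cast; ring
  rw [PySem.List.pyGetD_natCast, hcast,
    pv_inner keys (fun k' => PySem.Int.floordiv k' (keys.getD i 0) * c (keys.getD i 0) * c k') (i + 1)]

lemma pv_idx_nat (c : Int → Int) :
    ∀ keys : List Int, ((List.range keys.length).map (pvW c keys)).sum = pvPS c keys := by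
  intro keys
  induction keys with
  | nil => simp [pvPS]
  | cons k r ih =>
    have hW0 : pvW c (k :: r) 0 = c k * c k + (r.map (fun k' =>
        PySem.Int.floordiv k' k * c k * c k')).sum := by
      simp [pvW]
    have hWs : ∀ i : Nat, pvW c (k :: r) (i + 1) = pvW c r i := by
      intro i; simp [pvW]
    calc ((List.range (k :: r).length).map (pvW c (k :: r))).sum
        = pvW c (k :: r) 0 + (((List.range r.length).map Nat.succ).map (pvW c (k :: r))).sum := by
          simp only [List.length_cons, List.range_succ_eq_map, List.map_cons, List.sum_cons]
      _ = pvW c (k :: r) 0 + ((List.range r.length).map (pvW c r)).sum := by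
          rw [List.map_map]
          have h : (pvW c (k :: r) ∘ Nat.succ) = pvW c r := by
            funext i; exact hWs i
          rw [h]
      _ = pvPS c (k :: r) := by rw [hW0, ih]; rfl

-- the indexed double loop sum is the structural triangular sum
lemma pv_idx (c : Int → Int) (keys : List Int) :
    ((PySem.List.pyRange 0 (PySem.List.len keys) 1).map (pvG c keys)).sum = pvPS c keys := by
  rw [PySem.List.len_eq, PySem.List.pyRange_zero_natCast, List.map_map]
  rw [show (pvG c keys ∘ fun k : Nat => (k : Int)) = (fun i : Nat => pvG c keys (i : Int)) from rfl]
  calc ((List.range keys.length).map (fun i : Nat => pvG c keys (i : Int))).sum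
      = ((List.range keys.length).map (pvW c keys)).sum := by
        apply congrArg; exact List.map_congr_left (fun i _ => pv_GW c keys i)
    _ = pvPS c keys := pv_idx_nat c keys

-- summing the 0/1 indicator row over a nodup list containing a
lemma pv_single (F : Int → Int) (a : Int) :
    ∀ keys : List Int, keys.Nodup → a ∈ keys →
      (keys.map (fun k => (if k = a then (1 : Int) else 0) * F k)).sum = F a := by
  intro keys
  induction keys with
  | nil => intro _ h; simp at h
  | cons k r ih =>
    intro hnd hmem
    simp only [List.map_cons, List.sum_cons]
    rcases List.mem_cons.mp hmem with rfl | h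
    · have : ∀ k' ∈ r, (if k' = a then (1 : Int) else 0) * F k' = 0 := by
        intro k' hk'
        have : k' ≠ a := by
          intro he; subst he; exact (List.nodup_cons.mp hnd).1 hk'
        simp [this]
      rw [List.sum_eq_zero ?_]
      · simp
      · intro x hx
        rcases List.mem_map.mp hx with ⟨k', hk', rfl⟩
        exact this k' hk'
    · have hk : k ≠ a := by
        intro he; subst he; exact (List.nodup_cons.mp hnd).1 h
      rw [ih (List.nodup_cons.mp hnd).2 h]
      simp [hk]

-- ungrouping: a count-weighted sum over distinct keys is a sum over the elements
lemma pv_group (F : Int → Int) (keys : List Int) (hnd : keys.Nodup) :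
    ∀ nums : List Int, (∀ a ∈ nums, a ∈ keys) →
      (keys.map (fun k => (nums.count k : Int) * F k)).sum = (nums.map F).sum := by
  intro nums
  induction nums with
  | nil => intro _; simp
  | cons a l ih =>
    intro h
    have hstep : ∀ k : Int, (((a :: l).count k : Int)) * F k
        = ((l.count k : Int)) * F k + (if k = a then (1:Int) else 0) * F k := by
      intro k
      rw [List.count_cons]
      push_cast
      by_cases hk : k = a
      · simp [hk]; ring
      · simp [hk]
        exact Or.inl (fun he => hk he.symm)
    calc (keys.map (fun k => (((a :: l).count k : Int)) * F k)).sum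
        = (keys.map (fun k => ((l.count k : Int)) * F k + (if k = a then (1:Int) else 0) * F k)).sum := by
          apply congrArg; exact List.map_congr_left (fun k _ => hstep k)
      _ = (keys.map (fun k => ((l.count k : Int)) * F k)).sum
            + (keys.map (fun k => (if k = a then (1:Int) else 0) * F k)).sum := by
          exact PySem.List.sum_map_add_int keys _ _
      _ = (l.map F).sum + F a := by
          rw [ih (fun x hx => h x (List.mem_cons_of_mem a hx)),
            pv_single F a keys hnd (h a (List.mem_cons_self))]
      _ = ((a :: l).map F).sum := by simp [add_comm]

-- the triangular sum over sorted distinct keys is the full pvF double sum over keys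
lemma pv_ps_eq (c : Int → Int) :
    ∀ keys : List Int, keys.Nodup → keys.Pairwise (· < ·) →
      pvPS c keys = (keys.map (fun k => c k * (keys.map (fun k' => c k' * pvF k k')).sum)).sum := by
  intro keys
  induction keys with
  | nil => intro _ _; simp [pvPS]
  | cons k r ih =>
    intro hnd hp
    have hlt : ∀ a ∈ r, k < a := (List.pairwise_cons.mp hp).1
    have hnd' : r.Nodup := (List.nodup_cons.mp hnd).2
    have hp' : r.Pairwise (· < ·) := (List.pairwise_cons.mp hp).2
    simp only [List.map_cons, List.sum_cons]
    have hrow : c k * ((c k * pvF k k) + (r.map (fun k' => c k' * pvF k k')).sum)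
        = c k * c k + (r.map (fun k' => PySem.Int.floordiv k' k * c k * c k')).sum := by
      have h1 : pvF k k = 1 := by simp [pvF]
      have h2 : (r.map (fun k' => c k' * pvF k k')).sum
          = (r.map (fun k' => c k' * PySem.Int.floordiv k' k)).sum := by
        apply congrArg
        apply List.map_congr_left
        intro k' hk'
        have h := hlt k' hk'
        have : pvF k k' = PySem.Int.floordiv k' k := by
          simp [pvF, ne_of_lt h, h]
        rw [this]
      rw [h1, h2, mul_add, mul_comm (c k) 1, one_mul]
      congr 1
      rw [← List.sum_map_mul_left]
      apply congrArg
      apply List.map_congr_left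
      intro k' _
      ring
    have hrows : (r.map (fun k0 => c k0 * ((c k * pvF k0 k) + (r.map (fun k' => c k' * pvF k0 k')).sum))).sum
        = (r.map (fun k0 => c k0 * (r.map (fun k' => c k' * pvF k0 k')).sum)).sum := by
      apply congrArg
      apply List.map_congr_left
      intro k0 hk0
      have h := hlt k0 hk0
      have : pvF k0 k = 0 := by
        simp [pvF, (ne_of_lt h).symm, not_lt_of_gt h]
      rw [this]
      ring
    calc pvPS c (k :: r)
        = c k * c k + (r.map (fun k' => PySem.Int.floordiv k' k * c k * c k')).sum + pvPS c r := rfl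
      _ = c k * ((c k * pvF k k) + (r.map (fun k' => c k' * pvF k k')).sum)
            + (r.map (fun k0 => c k0 * ((c k * pvF k0 k) + (r.map (fun k' => c k' * pvF k0 k')).sum))).sum := by
          rw [hrow, hrows, ih hnd' hp']
      _ = _ := rfl

-- A computes pvTot mod 1e9+7
lemma pv_A_eq (nums : List Int) :
    sumOfFlooredPairs nums = PySem.Int.mod (pvTot nums) 1000000007 := by
  unfold sumOfFlooredPairs
  set counts := PySem.Dict.counter nums with hc
  set keys : List Int := PySem.List.sorted (PySem.Dict.keys counts) (fun k => k) false with hk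
  set c : Int → Int := fun k => counts.getD k 0 with hcf
  have hperm : keys.Perm (PySem.Set.ofList nums) := by
    rw [hk, hc, PySem.Dict.keys_counter]
    exact PySem.List.sorted_perm _ _ _
  have hnd : keys.Nodup := hperm.nodup_iff.mpr (PySem.Set.nodup_ofList nums)
  have hmem : ∀ a ∈ nums, a ∈ keys := by
    intro a ha
    rw [hk]
    rw [PySem.List.mem_sorted, hc, PySem.Dict.keys_counter, PySem.Set.mem_ofList]
    exact ha
  have hle : keys.Pairwise (fun a b => a ≤ b) := by
    rw [hk]; exact PySem.List.sorted_pairwise _ _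
  have hlt : keys.Pairwise (· < ·) := by
    have := List.Pairwise.and hle hnd
    exact this.imp (fun h => lt_of_le_of_ne h.1 h.2)
  have h0 : (0 : Int) = PySem.Int.mod 0 1000000007 := by decide
  calc (PySem.List.pyRange 0 (PySem.List.len keys) 1).foldl (fun ans i =>
        (PySem.List.pyRange (i + 1) (PySem.List.len keys) 1).foldl (fun ans j =>
          PySem.Int.mod (ans + PySem.Int.floordiv (PySem.List.pyGetD keys j 0) (PySem.List.pyGetD keys i 0) *
            c (PySem.List.pyGetD keys i 0) * c (PySem.List.pyGetD keys j 0)) 1000000007)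
          (PySem.Int.mod (ans + c (PySem.List.pyGetD keys i 0) * c (PySem.List.pyGetD keys i 0)) 1000000007))
        ((0 : Int))
      = PySem.Int.mod (0 + ((PySem.List.pyRange 0 (PySem.List.len keys) 1).map (pvG c keys)).sum) 1000000007 := by
        rw [h0]; exact pv_outer c keys _ 0
    _ = PySem.Int.mod (pvTot nums) 1000000007 := by
        rw [zero_add, pv_idx, pv_ps_eq c keys hnd hlt]
        congr 1
        have hcount : c = fun k => ((nums.count k : Int)) := by
          funext k; rw [hcf, hc]; exact PySem.Dict.getD_counter nums k
        rw [hcount]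
        rw [pv_group _ keys hnd nums hmem]
        unfold pvTot
        apply congrArg
        apply List.map_congr_left
        intro a _
        exact pv_group (pvF a) keys hnd nums hmem

-- B computes pvTot mod 1e9+7
lemma pv_B_eq (nums : List Int) :
    sumOfFlooredPairs_alt nums = PySem.Int.mod (pvTot nums) 1000000007 := by
  unfold sumOfFlooredPairs_alt
  have hinner : ∀ a : Int, (fun (ans : Int) b =>
      if a = b then ans + 1 else if a < b then ans + PySem.Int.floordiv b a else ans)
      = (fun (ans : Int) b => ans + pvF a b) := by
    intro a; funext ans b
    by_cases h1 : a = b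
    · simp [pvF, h1]
    · by_cases h2 : a < b <;> simp [pvF, h1, h2]
  have houter : (fun (ans : Int) a => nums.foldl (fun (ans : Int) b =>
      if a = b then ans + 1 else if a < b then ans + PySem.Int.floordiv b a else ans) ans)
      = (fun (ans : Int) a => ans + (nums.map (pvF a)).sum) := by
    funext ans a
    rw [hinner a, PySem.List.foldl_add]
  rw [houter, PySem.List.foldl_add]
  simp [pvTot]

-- ===== VERDICT (by name: the statement is the Claim_ definition above) =====
theorem sumOfFlooredPairs_spec : Claim_equal_sumOfFlooredPairs := by
  intro nums _ _
  show sumOfFlooredPairs nums = sumOfFlooredPairs_alt nums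
  rw [pv_A_eq, pv_B_eq]
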